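-- pv_equiv track=rewrite | github.com/stormalinblue/adventofcode | 2023/day10/part2.py | num_intersections_right
-- ===== SOURCE A (Python) =====
-- def num_intersections_right(path):
--     loop_active = False
--     up_n = 0
--     down_n = 0
--     for i in path:
--         if i == 'L':
--             up_n += 1
--         elif i == 'F':
--             down_n += 1
--         elif i == '7':
--             down_n += 1
--         elif i == '|':
--             up_n += 1
--             down_n += 1
--         elif i == 'J':
--             up_n += 1
--         elif i == 'S':
--             up_n += 1
--             down_n += 1
--     return up_n % 2 == 1 and down_n % 2 == 1
-- ===== SOURCE B (Python) =====
-- def num_intersections_right(path):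
--     # Parity-bit approach: no counters, no modulo. Two staged passes, each
--     # toggles a single boolean per matching element; result needs both parities odd.
--     def odd_count(chars):
--         odd = False
--         for c in path:
--             odd ^= c in chars
--         return odd
--     return odd_count(('L', 'J', '|', 'S')) and odd_count(('F', '7', '|', 'S'))
-- ===== Notes on version B (the rewrite author's own statement) =====
-- stated objective: alternative
-- what changed: Replaces A's single pass of branch-dispatch over integer counters plus two modulo tests by two staged passes that each maintain only a parity bit toggled by XOR on a membership test (short-circuiting the second pass), with no counters and no modulo.
import Mathlib
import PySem

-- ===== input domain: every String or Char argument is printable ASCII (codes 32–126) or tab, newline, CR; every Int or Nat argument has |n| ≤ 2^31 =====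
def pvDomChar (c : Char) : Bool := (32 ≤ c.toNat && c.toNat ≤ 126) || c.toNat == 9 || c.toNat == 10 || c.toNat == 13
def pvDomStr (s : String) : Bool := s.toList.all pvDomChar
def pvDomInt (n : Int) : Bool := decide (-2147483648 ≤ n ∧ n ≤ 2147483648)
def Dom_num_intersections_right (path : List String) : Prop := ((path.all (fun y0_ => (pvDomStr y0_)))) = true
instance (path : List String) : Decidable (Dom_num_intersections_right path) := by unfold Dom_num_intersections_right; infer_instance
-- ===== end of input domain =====

-- B replaces A's branch-dispatch counters + modulo by two staged parity-bit passes (XOR on membership); alternative decomposition.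
-- ===== PORT A =====
def pvStepA (st : Int × Int) (i : String) : Int × Int :=
  if i = "L" then (st.1 + 1, st.2)
  else if i = "F" then (st.1, st.2 + 1)
  else if i = "7" then (st.1, st.2 + 1)
  else if i = "|" then (st.1 + 1, st.2 + 1)
  else if i = "J" then (st.1 + 1, st.2)
  else if i = "S" then (st.1 + 1, st.2 + 1)
  else st

def num_intersections_right (path : List String) : Bool :=
  let st := path.foldl pvStepA (0, 0)
  PySem.Int.mod st.1 2 == 1 && PySem.Int.mod st.2 2 == 1

-- ===== PORT B =====
def pvOddCount (path : List String) (chars : List String) : Bool :=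
  path.foldl (fun odd c => xor odd (chars.contains c)) false

def num_intersections_right_alt (path : List String) : Bool :=
  pvOddCount path ["L", "J", "|", "S"] && pvOddCount path ["F", "7", "|", "S"]

-- ===== PRECONDITION & SPEC =====
def Spec_num_intersections_right (path : List String) (out : Bool) : Prop := out = num_intersections_right_alt path
instance (path : List String) (out : Bool) : Decidable (Spec_num_intersections_right path out) := by unfold Spec_num_intersections_right; infer_instance

-- ===== CLAIM (what is proved, stated in full; the proofs are below) =====
def Claim_equal_num_intersections_right : Prop := ∀ (path : List String), Dom_num_intersections_right path → Spec_num_intersections_right path (num_intersections_right path)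

-- ===== LEMMAS AND PROOFS =====

-- ===== VERDICT (by name: the statement is the Claim_ definition above) =====
theorem foldA_counts (path : List String) (st : Int × Int) :
    path.foldl pvStepA st
      = (st.1 + (path.count "L" + path.count "J" + path.count "|" + path.count "S" : Int),
         st.2 + (path.count "F" + path.count "7" + path.count "|" + path.count "S" : Int)) := by
  induction path generalizing st with
  | nil => simp
  | cons x xs ih =>
    simp only [List.foldl_cons, pvStepA]
    split_ifs with h1 h2 h3 h4 h5 h6 <;> rw [ih] <;> clear ih <;>
      simp_all only [List.count_cons, Prod.mk.injEq, beq_iff_eq, String.reduceEq,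
        ite_true, ite_false] <;>
      constructor <;> omega

theorem oddCount_parity (path chars : List String) (b : Bool) :
    path.foldl (fun odd c => xor odd (chars.contains c)) b
      = xor b (decide (path.countP (fun c => chars.contains c) % 2 = 1)) := by
  induction path generalizing b with
  | nil => simp
  | cons x xs ih =>
    simp only [List.foldl_cons, List.countP_cons, ih]
    by_cases h : x ∈ chars <;>
      simp only [h, List.contains_eq_mem, decide_true, decide_false, if_pos,
        Bool.xor_false, Bool.xor_true] <;>
      cases b <;> rw [Bool.eq_iff_iff] <;> simp <;> omega

theorem countP_up (path : List String) :
    path.countP (fun x => ["L", "J", "|", "S"].contains x)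
      = path.count "L" + path.count "J" + path.count "|" + path.count "S" := by
  induction path with
  | nil => simp
  | cons x xs ih =>
    simp only [List.countP_cons, List.count_cons, ih]
    by_cases h1 : x = "L" <;> by_cases h2 : x = "J" <;> by_cases h3 : x = "|" <;>
      by_cases h4 : x = "S" <;> simp_all <;> omega

theorem countP_down (path : List String) :
    path.countP (fun x => ["F", "7", "|", "S"].contains x)
      = path.count "F" + path.count "7" + path.count "|" + path.count "S" := by
  induction path with
  | nil => simp
  | cons x xs ih =>
    simp only [List.countP_cons, List.count_cons, ih]
    by_cases h1 : x = "F" <;> by_cases h2 : x = "7" <;> by_cases h3 : x = "|" <;>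
      by_cases h4 : x = "S" <;> simp_all <;> omega

theorem fmod_key (a b c d : ℕ) :
    ((((a : Int) + b + c + d).fmod 2) == 1) = decide ((a + b + c + d) % 2 = 1) := by
  rw [Bool.eq_iff_iff]
  simp only [beq_iff_eq, decide_eq_true_eq, Int.fmod_eq_emod]
  norm_num
  omega

theorem num_intersections_right_spec : Claim_equal_num_intersections_right := by
  intro path _
  unfold Spec_num_intersections_right num_intersections_right num_intersections_right_alt pvOddCount
  rw [foldA_counts, oddCount_parity, oddCount_parity, countP_up, countP_down]
  simp only [PySem.Int.mod, Bool.false_xor, zero_add, fmod_key]
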